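-- pv_equiv track=rewrite | github.com/beyzzk/hamming-sec-ded-code | main.py | insert_check_bit_placeholders
-- ===== SOURCE A (Python) =====
-- def calculate_check_bits_count(m):
--     r = 0
--     while (2 ** r) < (m + r + 1):
--         r += 1
--     return r
--
-- def is_power_of_two(n):
--     return n and (n & (n - 1)) == 0
--
-- def insert_check_bit_placeholders(data_bits):
--     m = len(data_bits)
--     r = calculate_check_bits_count(m)
--     total_len = m + r
--     result = ['0'] * total_len
--     j = 0  #veri bit index
--     for i in range(1, total_len + 1):
--         if not is_power_of_two(i):
--             result[-i] = data_bits[-(j + 1)]  #sağdan sola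
--             j += 1
--     return result
-- ===== SOURCE B (Python) =====
-- def insert_check_bit_placeholders(data_bits):
--     # Build the layout right-to-left as geometric chunks: one '0' placeholder
--     # (check bit 2**k) followed by the 2**k - 1 data slots that sit below the
--     # next check bit; no check-bit count and no power-of-two test are needed.
--     rev = data_bits[::-1]
--     out = []
--     k = 0
--     pos = 0
--     while pos < len(rev):
--         out.append('0')
--         size = (1 << k) - 1
--         out.extend(rev[pos:pos + size])
--         pos += size
--         k += 1
--     return out[::-1]
-- ===== Notes on version B (the rewrite author's own statement) =====
-- stated objective: alternative
-- what changed: A precomputes the check-bit count r, preallocates a zero list of length m+r and scans all positions testing each for power-of-two, mutating right-to-left with negative indices; B never computes r and never tests powers of two: it emits the result right-to-left as geometric chunks (one '0' placeholder followed by 2**k - 1 data bits for k = 0,1,2,...) until the reversed data is exhausted, then reverses.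
import Mathlib
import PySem

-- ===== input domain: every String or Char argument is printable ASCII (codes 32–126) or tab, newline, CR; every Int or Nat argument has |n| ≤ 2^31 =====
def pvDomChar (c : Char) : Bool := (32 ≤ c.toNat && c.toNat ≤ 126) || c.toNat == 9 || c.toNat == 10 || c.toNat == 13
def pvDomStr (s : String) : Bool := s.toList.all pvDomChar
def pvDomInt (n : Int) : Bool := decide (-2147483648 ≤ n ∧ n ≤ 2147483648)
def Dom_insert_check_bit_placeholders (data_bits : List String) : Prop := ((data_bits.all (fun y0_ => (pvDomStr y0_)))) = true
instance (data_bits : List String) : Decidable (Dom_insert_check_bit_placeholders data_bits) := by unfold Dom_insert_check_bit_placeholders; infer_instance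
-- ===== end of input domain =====

-- B builds the layout right-to-left as geometric chunks ('0' then 2^k - 1 data bits),
-- never computing the check-bit count r and never testing positions for powers of two
-- (objective: alternative algorithm, same cost).

-- ===== PORT A =====

-- `n and (n & (n - 1)) == 0`: as an `if` condition this is truthiness-equivalent to the Bool below
def pvIsPow2 (n : Int) : Bool := decide (n ≠ 0) && (PySem.Int.band n (n - 1) == 0)

-- the `while (2 ** r) < (m + r + 1)` loop of calculate_check_bits_count; fuel only makes it
-- total: the condition fails at r = m + 2 at the latest, so fuel m + 2 is never exhausted
def pvCalcLoopA (m : Nat) : Nat → Nat → Nat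
  | r, 0 => r
  | r, fuel + 1 => if 2 ^ r < m + r + 1 then pvCalcLoopA m (r + 1) fuel else r

def calculate_check_bits_count (m : Nat) : Nat := pvCalcLoopA m 0 (m + 2)

-- the loop body of A; `result[-i] = data_bits[-(j+1)]` (both indices always in range here)
def pvStepA (data_bits : List String) (st : List String × Nat) (i : Int) : List String × Nat :=
  if ¬ pvIsPow2 i then
    (PySem.List.pySetD st.1 (-i) (PySem.List.pyGetD data_bits (-((st.2 : Int) + 1)) "0"), st.2 + 1)
  else st

def insert_check_bit_placeholders (data_bits : List String) : List String :=
  let m := data_bits.length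
  let r := calculate_check_bits_count m
  let total := m + r
  ((PySem.List.pyRange 1 ((total : Int) + 1) 1).foldl (pvStepA data_bits)
      (List.replicate total "0", 0)).1

-- ===== PORT B =====

-- B's `while pos < len(rev)` loop, recursing on the remaining slice of the reversed
-- data: emit '0' (the check-bit placeholder for 2^k), then the next (1 << k) - 1 data
-- bits (`out.extend(rev[pos:pos+size])`), and continue with chunk k + 1
def pvChunks (k : Nat) (bits : List String) : List String :=
  match bits with
  | [] => []
  | b :: bs =>
    "0" :: ((b :: bs).take ((1 <<< k) - 1) ++ pvChunks (k + 1) ((b :: bs).drop ((1 <<< k) - 1)))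
termination_by bits.length + (if k = 0 then 1 else 0)
decreasing_by
  simp only [List.length_drop, List.length_cons, Nat.shiftLeft_eq, Nat.one_mul]
  have h1 : 1 ≤ 2 ^ k := Nat.one_le_two_pow
  cases k with
  | zero => simp
  | succ k =>
    have h2 : 2 ≤ 2 ^ (k + 1) := by
      calc 2 = 2 ^ 1 := rfl
        _ ≤ 2 ^ (k + 1) := Nat.pow_le_pow_right (by omega) (by omega)
    simp
    omega

def insert_check_bit_placeholders_alt (data_bits : List String) : List String :=
  (pvChunks 0 data_bits.reverse).reverse

-- ===== PRECONDITION & SPEC =====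
def Spec_insert_check_bit_placeholders (data_bits : List String) (out : List String) : Prop := out = insert_check_bit_placeholders_alt data_bits
instance (data_bits : List String) (out : List String) : Decidable (Spec_insert_check_bit_placeholders data_bits out) := by unfold Spec_insert_check_bit_placeholders; infer_instance

-- ===== CLAIM (what is proved, stated in full; the proofs are below) =====
def Claim_equal_insert_check_bit_placeholders : Prop := ∀ (data_bits : List String), Dom_insert_check_bit_placeholders data_bits → Spec_insert_check_bit_placeholders data_bits (insert_check_bit_placeholders data_bits)


-- ===== LEMMAS AND PROOFS =====

-- the power-of-two test on a positive Nat, as A's loop applies it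
def pvPw (n : Nat) : Bool := n &&& (n - 1) == 0

-- count of non-power / power positions among 1..n
def pvNcp (n : Nat) : Nat := (List.range n).countP (fun t => !pvPw (t + 1))
def pvCp (n : Nat) : Nat := (List.range n).countP (fun t => pvPw (t + 1))

-- A's result described positionally: walk positions n..1, '0' at powers, forward data else
def pvBuild : Nat → List String → List String
  | 0, _ => []
  | i + 1, bits =>
    if (i + 1) &&& i == 0 then "0" :: pvBuild i bits
    else
      match bits with
      | [] => "0" :: pvBuild i []
      | b :: bs => b :: pvBuild i bs

theorem pvCalcLoopA_exit (m : Nat) : ∀ (fuel r : Nat),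
    m + (r + fuel) + 1 ≤ 2 ^ (r + fuel) →
    m + pvCalcLoopA m r fuel + 1 ≤ 2 ^ pvCalcLoopA m r fuel := by
  intro fuel
  induction fuel with
  | zero => intro r h; simpa using h
  | succ fuel ih =>
    intro r h
    rw [pvCalcLoopA]
    split
    · have heq : r + (fuel + 1) = r + 1 + fuel := by omega
      rw [heq] at h
      exact ih (r + 1) h
    · omega

theorem pvCalcLoopA_below (m : Nat) : ∀ (fuel r k : Nat),
    r ≤ k → k < pvCalcLoopA m r fuel → 2 ^ k < m + k + 1 := by
  intro fuel
  induction fuel with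
  | zero => intro r k h1 h2; simp [pvCalcLoopA] at h2; omega
  | succ fuel ih =>
    intro r k h1 h2
    rw [pvCalcLoopA] at h2
    split at h2
    · rcases Nat.eq_or_lt_of_le h1 with rfl | hlt
      · assumption
      · exact ih (r + 1) k hlt h2
    · omega

theorem pvFuelEnough (m : Nat) : m + (0 + (m + 2)) + 1 ≤ 2 ^ (0 + (m + 2)) := by
  have h : m < 2 ^ m := Nat.lt_two_pow_self
  have he : 0 + (m + 2) = m + 2 := by omega
  rw [he]
  have h4 : 2 ^ (m + 2) = 4 * 2 ^ m := by ring
  omega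

theorem pvR_exit (m : Nat) :
    m + calculate_check_bits_count m + 1 ≤ 2 ^ calculate_check_bits_count m :=
  pvCalcLoopA_exit m (m + 2) 0 (pvFuelEnough m)

theorem pvR_below (m k : Nat) (h : k < calculate_check_bits_count m) : 2 ^ k < m + k + 1 :=
  pvCalcLoopA_below m (m + 2) 0 k (Nat.zero_le k) h

-- n & (n-1) == 0 detects powers of two (for positive n)
theorem pvPw_iff (n : Nat) (hn : 0 < n) : pvPw n = true ↔ ∃ k, n = 2 ^ k := by
  induction n using Nat.strong_induction_on with
  | _ n ih =>
    rcases Nat.even_or_odd n with ⟨a, ha⟩ | ⟨a, ha⟩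
    · have ha2 : n = 2 * a := by omega
      have hapos : 0 < a := by omega
      have hb : n &&& (n - 1) = 2 * (a &&& (a - 1)) := by
        have h1 : n = Nat.bit false a := by simp [Nat.bit_false_apply]; omega
        have h2 : n - 1 = Nat.bit true (a - 1) := by simp [Nat.bit_true_apply]; omega
        rw [h2, h1, Nat.land_bit]
        simp [Nat.bit_false_apply]
      constructor
      · intro h
        simp only [pvPw, beq_iff_eq] at h
        have : a &&& (a - 1) = 0 := by omega
        obtain ⟨k, hk⟩ := (ih a (by omega) hapos).1 (by simp [pvPw, this])
        exact ⟨k + 1, by rw [ha2, hk]; ring⟩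
      · rintro ⟨k, hk⟩
        match k with
        | 0 => omega
        | k + 1 =>
          have hak : a = 2 ^ k := by
            have : 2 ^ (k + 1) = 2 * 2 ^ k := by ring
            omega
          have := (ih a (by omega) hapos).2 ⟨k, hak⟩
          simp only [pvPw, beq_iff_eq] at this ⊢
          omega
    · have hb : n &&& (n - 1) = 2 * a := by
        have h1 : n = Nat.bit true a := by simp [Nat.bit_true_apply]; omega
        have h2 : n - 1 = Nat.bit false a := by simp [Nat.bit_false_apply]; omega
        rw [h2, h1, Nat.land_bit]
        simp [Nat.bit_false_apply, Nat.and_self]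
      constructor
      · intro h
        simp only [pvPw, beq_iff_eq] at h
        exact ⟨0, by omega⟩
      · rintro ⟨k, hk⟩
        match k with
        | 0 => simp [pvPw]; omega
        | k + 1 =>
          exfalso
          have : 2 ^ (k + 1) = 2 * 2 ^ k := by ring
          omega

theorem pvNcp_succ (n : Nat) :
    pvNcp (n + 1) = pvNcp n + (if pvPw (n + 1) then 0 else 1) := by
  simp only [pvNcp, List.range_succ, List.countP_append, List.countP_cons, List.countP_nil]
  cases h : pvPw (n + 1)
  · simp
  · simp

theorem pvNcp_mono (a b : Nat) (h : a ≤ b) : pvNcp a ≤ pvNcp b := by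
  obtain ⟨d, rfl⟩ := Nat.le.dest h
  simp only [pvNcp, List.range_add, List.countP_append]
  omega

theorem pvNcp_add_cp (n : Nat) : pvNcp n + pvCp n = n := by
  have h : ∀ (l : List Nat) (p : Nat → Bool), l.countP p + l.countP (fun a => !p a) = l.length := by
    intro l p
    induction l with
    | nil => simp
    | cons x t ihl => by_cases h : p x <;> simp [h] <;> omega
  have := h (List.range n) (fun t => !pvPw (t + 1))
  simp only [pvNcp, pvCp]
  simp only [Bool.not_not] at this
  simpa using this

theorem pvCountP_range (n : Nat) (p : Nat → Bool) :
    (List.range n).countP p = ((Finset.range n).filter (fun t => p t = true)).card := by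
  induction n with
  | zero => simp
  | succ n ih =>
    rw [List.range_succ, List.countP_append, Finset.range_add_one, Finset.filter_insert]
    by_cases h : p n = true
    · rw [if_pos h, Finset.card_insert_of_notMem (by simp)]
      simp [h, ih]
    · rw [if_neg h]
      simp only [List.countP_cons, List.countP_nil]
      simp [h, ih]

-- exactly r of the positions 1..m+r are powers of two
theorem pvCp_total (m : Nat) :
    pvCp (m + calculate_check_bits_count m) = calculate_check_bits_count m := by
  set R := calculate_check_bits_count m with hR
  rw [pvCp, pvCountP_range]
  have himg : (Finset.range (m + R)).filter (fun t => pvPw (t + 1) = true)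
      = (Finset.range R).image (fun k => 2 ^ k - 1) := by
    ext t
    simp only [Finset.mem_filter, Finset.mem_range, Finset.mem_image]
    constructor
    · rintro ⟨ht, hp⟩
      obtain ⟨k, hk⟩ := (pvPw_iff (t + 1) (by omega)).1 hp
      refine ⟨k, ?_, by omega⟩
      have hexit := pvR_exit m
      rw [← hR] at hexit
      have h2k : 2 ^ k ≤ m + R := by omega
      by_contra hkR
      have : 2 ^ R ≤ 2 ^ k := Nat.pow_le_pow_right (by omega) (by omega)
      omega
    · rintro ⟨k, hkR, rfl⟩
      have hk1 : 0 < 2 ^ k := Nat.pow_pos (by omega)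
      have hble : 2 ^ k < m + k + 1 := pvR_below m k hkR
      refine ⟨by omega, ?_⟩
      have : (2 ^ k - 1) + 1 = 2 ^ k := by omega
      rw [this]
      exact (pvPw_iff (2 ^ k) hk1).2 ⟨k, rfl⟩
  rw [himg, Finset.card_image_of_injective _ (fun a b hab => by
    have ha : 0 < 2 ^ a := Nat.pow_pos (by omega)
    have hb : 0 < 2 ^ b := Nat.pow_pos (by omega)
    have : 2 ^ a = 2 ^ b := by omega
    exact Nat.pow_right_injective (by omega) this), Finset.card_range]

theorem pvNcp_total (m : Nat) : pvNcp (m + calculate_check_bits_count m) = m := by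
  have h1 := pvNcp_add_cp (m + calculate_check_bits_count m)
  have h2 := pvCp_total m
  omega

theorem pvBuild_succ_pow (i : Nat) (bits : List String) (h : ((i + 1) &&& i == 0) = true) :
    pvBuild (i + 1) bits = "0" :: pvBuild i bits := by
  rw [pvBuild.eq_def]; simp [h]

theorem pvBuild_succ_cons (i : Nat) (b : String) (bs : List String) (h : ((i + 1) &&& i == 0) = false) :
    pvBuild (i + 1) (b :: bs) = b :: pvBuild i bs := by
  rw [pvBuild.eq_def]; simp [h]

theorem pvBuild_length : ∀ (i : Nat) (bits : List String), (pvBuild i bits).length = i := by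
  intro i
  induction i with
  | zero => intro bits; rfl
  | succ i ih =>
    intro bits
    by_cases h : ((i + 1) &&& i == 0) = true
    · rw [pvBuild_succ_pow i bits h]; simp [ih]
    · cases bits with
      | nil =>
        rw [pvBuild.eq_def]
        simp only [Bool.not_eq_true] at h
        simp [h, ih]
      | cons b bs =>
        rw [pvBuild_succ_cons i b bs (by simpa using h)]; simp [ih]

-- the Int-side test of port A agrees with pvPw on positive positions
theorem pvIsPow2_cast (k : Nat) : pvIsPow2 ((k : Int) + 1) = pvPw (k + 1) := by
  simp only [pvIsPow2, pvPw]
  have h1 : ((k : Int) + 1) ≠ 0 := by omega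
  have h2 : (k : Int) + 1 - 1 = (k : Int) := by ring
  have h3 : ((k : Int) + 1) = ((k + 1 : Nat) : Int) := by push_cast; ring
  rw [h2, h3, PySem.Int.band_natCast]
  have h4 : (decide (((k + 1 : Nat) : Int) ≠ 0)) = true := by
    rw [decide_eq_true_eq]
    push_cast
    omega
  rw [h4, Bool.true_and, Nat.add_sub_cancel]
  rcases Nat.eq_zero_or_pos ((k + 1) &&& k) with hz | hz
  · simp [hz]
  · have hnz : ((k + 1) &&& k : Nat) ≠ 0 := by omega
    simp [hnz, Int.natCast_eq_zero]

-- Python's negative-index assignment xs[-k] = v, resolved to a flat List.set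
theorem pvSetD_neg_natCast {α : Type} (xs : List α) (k : Nat) (v : α) (hk : 0 < k) (hk' : k ≤ xs.length) :
    PySem.List.pySetD xs (-(k : Int)) v = xs.set (xs.length - k) v := by
  simp [PySem.List.pySetD, PySem.List.pySet?, PySem.List.pyIdx?]
  rw [if_neg (by omega), if_pos hk']
  rfl

-- the loop invariant of A's fold: after processing positions 1..k, the last k slots carry
-- the positional suffix and j counts the non-power positions seen so far
theorem pvFoldA_inv (bits : List String) (k : Nat)
    (hk : k ≤ bits.length + calculate_check_bits_count bits.length) :
    (PySem.List.pyRange 1 ((k : Int) + 1) 1).foldl (pvStepA bits)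
      (List.replicate (bits.length + calculate_check_bits_count bits.length) "0", 0)
    = (List.replicate (bits.length + calculate_check_bits_count bits.length - k) "0"
         ++ pvBuild k (bits.drop (bits.length - pvNcp k)), pvNcp k) := by
  set m := bits.length with hm
  set R := calculate_check_bits_count m with hRdef
  induction k with
  | zero =>
    rw [PySem.List.pyRange_one_eq_nil (by omega)]
    simp [pvBuild, pvNcp]
  | succ k ih =>
    have hk' : k ≤ m + R := by omega
    have hsplit : PySem.List.pyRange 1 (((k + 1 : Nat) : Int) + 1) 1
        = PySem.List.pyRange 1 ((k : Int) + 1) 1 ++ [(k : Int) + 1] := by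
      have : (((k + 1 : Nat) : Int) + 1) = ((k : Int) + 1) + 1 := by push_cast; ring
      rw [this, PySem.List.pyRange_one_succ_right (by omega)]
    rw [hsplit, List.foldl_append, ih hk']
    simp only [List.foldl_cons, List.foldl_nil]
    rw [pvStepA, pvIsPow2_cast]
    have hlen1 : 1 ≤ m + R - k := by omega
    cases hp : pvPw (k + 1) with
    | true =>
      rw [if_neg (by decide)]
      have hns : pvNcp (k + 1) = pvNcp k := by rw [pvNcp_succ, hp]; simp
      rw [hns]
      have hand : ((k + 1) &&& k == 0) = true := by
        have h' := hp; simp only [pvPw, Nat.add_sub_cancel] at h'; exact h'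
      have hb : pvBuild (k + 1) (bits.drop (m - pvNcp k)) = "0" :: pvBuild k (bits.drop (m - pvNcp k)) :=
        pvBuild_succ_pow k _ hand
      rw [hb]
      have hrep : List.replicate (m + R - k) "0" = List.replicate (m + R - (k + 1)) "0" ++ ["0"] := by
        have : m + R - k = (m + R - (k + 1)) + 1 := by omega
        rw [this, List.replicate_succ']
      rw [hrep, List.append_assoc]
      rfl
    | false =>
      rw [if_pos (by decide)]
      set j := pvNcp k with hj
      have hjsucc : pvNcp (k + 1) = j + 1 := by rw [pvNcp_succ, hp]; rfl
      have hjm : j + 1 ≤ m := by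
        have h1 : pvNcp (k + 1) ≤ pvNcp (m + R) := pvNcp_mono _ _ (by omega)
        have h2 : pvNcp (m + R) = m := pvNcp_total m
        omega
      have hslen : (List.replicate (m + R - k) "0" ++ pvBuild k (bits.drop (m - j))).length
          = m + R := by
        rw [List.length_append, List.length_replicate, pvBuild_length]; omega
      have hset : PySem.List.pySetD (List.replicate (m + R - k) "0" ++ pvBuild k (bits.drop (m - j)))
            (-((k : Int) + 1)) (PySem.List.pyGetD bits (-((j : Int) + 1)) "0")
          = (List.replicate (m + R - k) "0" ++ pvBuild k (bits.drop (m - j))).set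
            (m + R - (k + 1)) (PySem.List.pyGetD bits (-((j : Int) + 1)) "0") := by
        have hcast : (-((k : Int) + 1)) = -(((k + 1 : Nat) : Int)) := by push_cast; ring
        rw [hcast]
        rw [pvSetD_neg_natCast _ (k + 1) _ (by omega) (by rw [hslen]; omega), hslen]
      rw [hset]
      have hget : PySem.List.pyGetD bits (-((j : Int) + 1)) "0"
          = bits[m - (j + 1)]'(by omega) := by
        have hcast : (-((j : Int) + 1)) = -(((j + 1 : Nat) : Int)) := by push_cast; ring
        rw [hcast, PySem.List.pyGetD_neg_natCast bits (j + 1) "0" (by omega) (by omega)]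
      rw [hget]
      have hsetprefix : (List.replicate (m + R - k) "0" ++ pvBuild k (bits.drop (m - j))).set
            (m + R - (k + 1)) (bits[m - (j + 1)]'(by omega))
          = (List.replicate (m + R - (k + 1)) "0" ++ [bits[m - (j + 1)]'(by omega)])
              ++ pvBuild k (bits.drop (m - j)) := by
        rw [List.set_append_left _ _ (by rw [List.length_replicate]; omega)]
        congr 1
        have hrep : List.replicate (m + R - k) "0"
            = List.replicate (m + R - (k + 1)) "0" ++ ["0"] := by
          have : m + R - k = (m + R - (k + 1)) + 1 := by omega
          rw [this, List.replicate_succ']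
        rw [hrep, List.set_append_right _ _ (by simp), List.length_replicate]
        simp
      rw [hsetprefix]
      have hdrop : bits.drop (m - (j + 1)) = bits[m - (j + 1)]'(by omega) :: bits.drop (m - j) := by
        have heq : m - (j + 1) + 1 = m - j := by omega
        rw [List.drop_eq_getElem_cons (by omega), heq]
      have hand : ((k + 1) &&& k == 0) = false := by
        have h' := hp; simp only [pvPw, Nat.add_sub_cancel] at h'; exact h'
      have hb : pvBuild (k + 1) (bits.drop (m - (j + 1)))
          = bits[m - (j + 1)]'(by omega) :: pvBuild k (bits.drop (m - j)) := by
        rw [hdrop, pvBuild_succ_cons k _ _ hand]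
      rw [hjsucc, hb, List.append_assoc]
      simp

-- ===== the B side: pvChunks bridged to pvBuild =====

theorem pvChunks_nil (k : Nat) : pvChunks k [] = [] := by
  rw [pvChunks]

theorem pvChunks_ne (k : Nat) (bits : List String) (h : bits ≠ []) :
    pvChunks k bits = "0" :: (bits.take (2 ^ k - 1) ++ pvChunks (k + 1) (bits.drop (2 ^ k - 1))) := by
  cases bits with
  | nil => exact absurd rfl h
  | cons b bs => rw [pvChunks]; simp [Nat.shiftLeft_eq]

-- total data bits held by d consecutive chunks starting at chunk K (chunk j holds 2^j - 1)
def pvS : Nat → Nat → Nat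
  | _, 0 => 0
  | K, d + 1 => (2 ^ K - 1) + pvS (K + 1) d

theorem pvS_closed (d : Nat) : ∀ K, pvS K d = 2 ^ (K + d) - 2 ^ K - d := by
  induction d with
  | zero => intro K; simp [pvS]
  | succ d ih =>
    intro K
    show (2 ^ K - 1) + pvS (K + 1) d = _
    rw [ih (K + 1)]
    have h1 : 2 ^ (K + 1) = 2 * 2 ^ K := by ring
    have hE : 2 ^ (K + 1 + d) = 2 ^ (K + (d + 1)) := by congr 1; omega
    have hX : 1 ≤ 2 ^ K := Nat.one_le_two_pow
    rcases Nat.eq_zero_or_pos d with rfl | hd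
    · have g1 : (2 : Nat) ^ (K + 1 + 0) = 2 ^ (K + 1) := rfl
      have g2 : (2 : Nat) ^ (K + (0 + 1)) = 2 ^ (K + 1) := rfl
      rw [g1, g2, h1]
      omega
    · have hY : 2 ^ (K + (d + 1)) = 2 ^ (K + 1) * 2 ^ d := by
        rw [← pow_add]; congr 1; omega
      have h22 : 2 ≤ 2 ^ (K + 1) := by
        calc 2 = 2 ^ 1 := rfl
          _ ≤ 2 ^ (K + 1) := Nat.pow_le_pow_right (by omega) (by omega)
      have hd2 : 2 ≤ 2 ^ d := by
        calc 2 = 2 ^ 1 := rfl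
          _ ≤ 2 ^ d := Nat.pow_le_pow_right (by omega) (by omega)
      have hmul : 2 ^ (K + 1) + 2 ^ d ≤ 2 ^ (K + 1) * 2 ^ d := Nat.add_le_mul h22 hd2
      have hdlt : d < 2 ^ d := Nat.lt_two_pow_self
      omega

-- peel the TOP chunk off pvChunks: for K ≥ 1 and data reaching into chunk K + d but not past it
theorem pvPeel : ∀ (d K : Nat) (rev : List String), 1 ≤ K →
    pvS K d < rev.length → rev.length ≤ pvS K (d + 1) →
    pvChunks K rev = pvChunks K (rev.take (pvS K d)) ++ "0" :: rev.drop (pvS K d) := by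
  intro d
  induction d with
  | zero =>
    intro K rev hK h1 h2
    simp only [pvS, Nat.add_zero] at h1 h2 ⊢
    have hne : rev ≠ [] := by intro h; rw [h] at h1; simp at h1
    rw [pvChunks_ne K rev hne]
    rw [List.take_of_length_le (by omega), List.drop_eq_nil_of_le (by omega), pvChunks_nil]
    simp [pvChunks_nil]
  | succ d ih =>
    intro K rev hK h1 h2
    have hsp1 : pvS K (d + 1) = (2 ^ K - 1) + pvS (K + 1) d := rfl
    have hsp2 : pvS K (d + 1 + 1) = (2 ^ K - 1) + pvS (K + 1) (d + 1) := rfl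
    have h4 : 2 ≤ 2 ^ K := by
      calc 2 = 2 ^ 1 := rfl
        _ ≤ 2 ^ K := Nat.pow_le_pow_right (by omega) hK
    have hlen : 2 ^ K - 1 < rev.length := by omega
    have hne : rev ≠ [] := by intro h; rw [h] at hlen; simp at hlen
    rw [pvChunks_ne K rev hne]
    have hih := ih (K + 1) (rev.drop (2 ^ K - 1)) (by omega)
      (by rw [List.length_drop]; omega)
      (by rw [List.length_drop]; omega)
    rw [hih]
    have htne : rev.take (pvS K (d + 1)) ≠ [] := by
      intro h
      have hl := congrArg List.length h
      rw [List.length_take] at hl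
      simp only [List.length_nil] at hl
      omega
    rw [pvChunks_ne K _ htne, List.take_take]
    have hmin : min (2 ^ K - 1) (pvS K (d + 1)) = 2 ^ K - 1 := by omega
    rw [hmin, List.drop_take]
    have harith : pvS K (d + 1) - (2 ^ K - 1) = pvS (K + 1) d := by omega
    rw [harith, List.drop_drop]
    have harith2 : 2 ^ K - 1 + pvS (K + 1) d = pvS K (d + 1) := hsp1.symm
    rw [harith2]
    simp

-- no powers of two strictly between 2^c and 2^(c+1)
theorem pvPw_between (c n : Nat) (h1 : 2 ^ c < n) (h2 : n < 2 ^ (c + 1)) : pvPw n = false := by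
  cases hh : pvPw n
  · rfl
  · exfalso
    obtain ⟨j, hj⟩ := (pvPw_iff n (by omega)).1 hh
    rcases Nat.lt_or_ge c j with hlt | hge
    · have : 2 ^ (c + 1) ≤ 2 ^ j := Nat.pow_le_pow_right (by omega) hlt
      omega
    · have : 2 ^ j ≤ 2 ^ c := Nat.pow_le_pow_right (by omega) hge
      omega

-- peel the TOP data segment off pvBuild: positions 2^c + d .. 2^c + 1 are all data slots
theorem pvTopPeel : ∀ (d : Nat) (c : Nat) (bits : List String), d ≤ bits.length →
    2 ^ c + d < 2 ^ (c + 1) →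
    pvBuild (2 ^ c + d) bits = bits.take d ++ pvBuild (2 ^ c) (bits.drop d) := by
  intro d
  induction d with
  | zero => intro c bits _ _; simp
  | succ d ih =>
    intro c bits hlen hub
    cases bits with
    | nil => simp at hlen
    | cons b bs =>
      have hpw : pvPw (2 ^ c + d + 1) = false :=
        pvPw_between c (2 ^ c + d + 1) (by omega) (by omega)
      have hand : ((2 ^ c + d + 1) &&& (2 ^ c + d) == 0) = false := by
        have h' := hpw
        simp only [pvPw, Nat.add_sub_cancel] at h'
        exact h'
      have hstep : pvBuild (2 ^ c + (d + 1)) (b :: bs) = b :: pvBuild (2 ^ c + d) bs := by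
        have : 2 ^ c + (d + 1) = (2 ^ c + d) + 1 := by omega
        rw [this, pvBuild_succ_cons (2 ^ c + d) b bs hand]
      rw [hstep, ih c bs (by simpa using hlen) (by omega)]
      simp

-- the bridge: pvBuild over L + c + 1 positions equals B's chunked construction,
-- when 2^c is the largest power of two below the total length
theorem pvBridge : ∀ (c : Nat), ∀ (bits : List String), 1 ≤ c →
    2 ^ c < bits.length + c + 1 → bits.length + c + 1 < 2 ^ (c + 1) →
    pvBuild (bits.length + c + 1) bits = (pvChunks 0 bits.reverse).reverse := by
  intro c
  induction c using Nat.strong_induction_on with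
  | _ c ih =>
    intro bits hc hlb hub
    match c, hc with
    | 1, _ =>
      -- 2 < L + 2 < 4 forces L = 1
      have hL : bits.length = 1 := by omega
      match bits, hL with
      | [b], _ =>
        show pvBuild 3 [b] = (pvChunks 0 [b]).reverse
        rw [pvChunks_ne 0 [b] (by simp)]
        simp only [pow_zero, Nat.sub_self, List.take_zero, List.drop_zero, List.nil_append]
        rw [pvChunks_ne 1 [b] (by simp)]
        norm_num
        rw [pvChunks_nil]
        rw [show (3 : Nat) = 2 + 1 from rfl, pvBuild_succ_cons 2 b [] (by decide)]
        rw [show (2 : Nat) = 1 + 1 from rfl, pvBuild_succ_pow 1 [] (by decide)]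
        rw [show (1 : Nat) = 0 + 1 from rfl, pvBuild_succ_pow 0 [] (by decide)]
        simp [pvBuild]
    | (c + 2), _ =>
      set c' := c + 2 with hc'
      set L := bits.length with hLdef
      set S := pvS 1 (c' - 1) with hSdef
      have h2c : 2 ≤ 2 ^ c' := by
        calc 2 = 2 ^ 1 := rfl
          _ ≤ 2 ^ c' := Nat.pow_le_pow_right (by omega) (by omega)
      have hcount : c' < 2 ^ c' := Nat.lt_two_pow_self
      have hquad : 2 ^ c' = 4 * 2 ^ c := by rw [hc']; ring
      have hcc : c < 2 ^ c := Nat.lt_two_pow_self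
      have hSval : S = 2 ^ c' - c' - 1 := by
        rw [hSdef, pvS_closed]
        have : 1 + (c' - 1) = c' := by omega
        rw [this]
        omega
      have hS2 : pvS 1 ((c' - 1) + 1) = 2 ^ (c' + 1) - 2 - c' := by
        rw [pvS_closed]
        have : 1 + (c' - 1 + 1) = c' + 1 := by omega
        rw [this]
        have : 2 ^ (c' + 1) = 2 * 2 ^ c' := by ring
        omega
      have hpow21 : 2 ^ (c' + 1) = 2 * 2 ^ c' := by ring
      have hSL : S < L := by omega
      have hrevne : bits.reverse ≠ [] := by
        intro h
        have h2 : bits = [] := by simpa using congrArg List.reverse h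
        rw [h2] at hLdef
        simp [hLdef] at hSL
      -- unfold chunk 0 (no data), then peel the top chunk c' off pvChunks 1
      rw [pvChunks_ne 0 bits.reverse hrevne]
      simp only [pow_zero, Nat.sub_self, List.take_zero, List.drop_zero, List.nil_append]
      have hpeel := pvPeel (c' - 1) 1 bits.reverse (le_refl 1)
        (by rw [← hSdef, List.length_reverse]; omega)
        (by rw [hS2, List.length_reverse]; omega)
      rw [← hSdef] at hpeel
      rw [hpeel]
      -- identify the pieces with bits.take / bits.drop
      have hdropS : (bits.reverse.drop S).reverse = bits.take (L - S) := by
        rw [List.reverse_drop, List.reverse_reverse, List.length_reverse]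
      have htakeS : bits.reverse.take S = (bits.drop (L - S)).reverse := by
        rw [List.reverse_drop]
        congr 1
        omega
      -- LHS: peel the top data segment, then the '0' at position 2^c'
      have hd : L + c' + 1 = 2 ^ c' + (L - S) := by omega
      rw [hd, pvTopPeel (L - S) c' bits (by omega) (by omega)]
      have hpow2 : pvPw (2 ^ c') = true :=
        (pvPw_iff (2 ^ c') (by omega)).2 ⟨c', rfl⟩
      have hzero : pvBuild (2 ^ c') (bits.drop (L - S)) =
          "0" :: pvBuild (2 ^ c' - 1) (bits.drop (L - S)) := by
        have h1 : 2 ^ c' = (2 ^ c' - 1) + 1 := by omega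
        rw [h1]
        apply pvBuild_succ_pow
        have h2 := hpow2
        simp only [pvPw] at h2
        rw [← h1]
        exact h2
      rw [hzero]
      -- recursive part via the IH at c' - 1
      have hlen' : (bits.drop (L - S)).length = S := by
        rw [List.length_drop]; omega
      have hih := ih (c' - 1) (by omega) (bits.drop (L - S)) (by omega)
        (by
          rw [hlen']
          have hh : S + (c' - 1) + 1 = 2 ^ c' - 1 := by omega
          rw [hh]
          have hc1 : c' - 1 + 1 = c' := by omega
          have hhalf : 2 ^ (c' - 1) * 2 = 2 ^ c' := by rw [← pow_succ, hc1]
          have h4 : 4 ≤ 2 ^ c' := by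
            calc 4 = 2 ^ 2 := rfl
              _ ≤ 2 ^ c' := Nat.pow_le_pow_right (by omega) (by omega)
          omega)
        (by
          rw [hlen']
          have hh : S + (c' - 1) + 1 = 2 ^ c' - 1 := by omega
          rw [hh]
          have hh2 : c' - 1 + 1 = c' := by omega
          rw [hh2]
          omega)
      have hS1 : S + (c' - 1) + 1 = 2 ^ c' - 1 := by omega
      rw [hlen', hS1] at hih
      rw [hih]
      -- the chunked form of the recursive call matches the peeled prefix
      have hinner_ne : (bits.drop (L - S)).reverse ≠ [] := by
        intro h
        have hl := congrArg List.length h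
        rw [List.length_reverse, hlen'] at hl
        simp at hl
        omega
      rw [pvChunks_ne 0 _ hinner_ne]
      simp only [pow_zero, Nat.sub_self, List.take_zero, List.drop_zero, List.nil_append]
      rw [← htakeS]
      simp [hdropS]

-- A's loop never stops before r = 2 once there is a data bit
theorem pvR_ge_two (m : Nat) (hm : 1 ≤ m) : 2 ≤ calculate_check_bits_count m := by
  have hexit := pvR_exit m
  by_contra h
  interval_cases hR : calculate_check_bits_count m <;> omega

-- ===== VERDICT (by name: the statement is the Claim_ definition above) =====
theorem insert_check_bit_placeholders_spec : Claim_equal_insert_check_bit_placeholders := by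
  intro bits _
  unfold Spec_insert_check_bit_placeholders insert_check_bit_placeholders insert_check_bit_placeholders_alt
  simp only []
  have h := pvFoldA_inv bits (bits.length + calculate_check_bits_count bits.length) (le_refl _)
  rw [h, pvNcp_total, Nat.sub_self, Nat.sub_self]
  simp only [List.replicate_zero, List.drop_zero, List.nil_append]
  cases hbits : bits with
  | nil =>
    show pvBuild (0 + calculate_check_bits_count 0) [] = (pvChunks 0 ([] : List String).reverse).reverse
    rw [show calculate_check_bits_count 0 = 0 from rfl, List.reverse_nil, pvChunks_nil]
    rfl
  | cons b bs =>
    rw [← hbits]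
    have hm : 1 ≤ bits.length := by rw [hbits]; simp
    set m := bits.length with hmdef
    set R := calculate_check_bits_count m with hRdef
    have hR2 : 2 ≤ R := pvR_ge_two m hm
    have hlb : 2 ^ (R - 1) < m + (R - 1) + 1 := pvR_below m (R - 1) (by omega)
    have hub : m + R + 1 ≤ 2 ^ R := pvR_exit m
    have hbr := pvBridge (R - 1) bits (by omega)
      (by rw [← hmdef]; omega)
      (by
        rw [← hmdef]
        have h1 : R - 1 + 1 = R := by omega
        rw [h1]
        omega)
    have h2 : m + (R - 1) + 1 = m + R := by omega
    rw [h2] at hbr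
    exact hbr
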